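-- pv_equiv track=rewrite | github.com/PaoloMarconi95/WaterCounter | main.py | next_big_at
-- ===== SOURCE A (Python) =====
-- def next_big_at(arr, i):
--     max_t = 0
--     ind = -1
--     maximum = arr[i - 1]
--     found = False
--     x = i + 1
--     while not found:
--         if x > len(arr) - 1:
--             found = True
--         else:
--             if arr[x] >= maximum:
--                 maximum = arr[x]
--                 ind = x
--                 found = True
--             elif arr[x] > arr[i]:
--                 if arr[x] > max_t:
--                     max_t = arr[x]
--                     ind = x
--             x = x + 1
--     return ind
-- ===== SOURCE B (Python) =====
-- def next_big_at(arr, i):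
--     n = len(arr)
--     threshold = arr[i - 1]
--     for x in range(i + 1, n):
--         if arr[x] >= threshold:
--             return x
--     ind = -1
--     max_t = 0
--     for x in range(i + 1, n):
--         if arr[x] > arr[i] and arr[x] > max_t:
--             max_t = arr[x]
--             ind = x
--     return ind
-- ===== Notes on version B (the rewrite author's own statement) =====
-- stated objective: alternative
-- what changed: A's single early-exit while loop that interleaves the find-first test with max_t/ind bookkeeping is replaced by two sequential passes: a find-first scan for the first arr[x] >= arr[i-1], and only if it fails a separate fold computing the conditional maximum's index.
import Mathlib
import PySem

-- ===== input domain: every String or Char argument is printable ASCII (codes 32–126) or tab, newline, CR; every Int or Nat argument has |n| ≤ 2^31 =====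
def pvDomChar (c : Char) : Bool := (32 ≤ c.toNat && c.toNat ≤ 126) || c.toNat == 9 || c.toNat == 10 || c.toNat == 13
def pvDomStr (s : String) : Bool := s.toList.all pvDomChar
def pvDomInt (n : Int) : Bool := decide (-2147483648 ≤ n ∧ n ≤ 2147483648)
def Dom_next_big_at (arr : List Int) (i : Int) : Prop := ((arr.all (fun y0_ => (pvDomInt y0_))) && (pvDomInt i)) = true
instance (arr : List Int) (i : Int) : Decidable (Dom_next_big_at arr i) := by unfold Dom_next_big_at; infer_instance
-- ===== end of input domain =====

-- B replaces A's single interleaved early-exit while loop by two sequential passes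
-- (find-first, then a fold for the conditional maximum); objective: alternative decomposition, same cost.

-- ===== PORT A =====
-- A's while loop, state (maximum, x, max_t, ind); indexing via pyGetD (exact under Pre_,
-- which excludes exactly the inputs where Python's arr[...] raises).
def nextBigLoop (arr : List Int) (ai : Int) (maximum : Int) : Nat → Int → Int → Int → Int
  | 0, _, _, ind => ind  -- fuel guard only: never reached with the fuel supplied below
  | fuel + 1, x, max_t, ind =>
    if x > (arr.length : Int) - 1 then ind
    else
      let ax := PySem.List.pyGetD arr x 0
      if ax ≥ maximum then x
      else if ax > ai then
        if ax > max_t then nextBigLoop arr ai maximum fuel (x + 1) ax x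
        else nextBigLoop arr ai maximum fuel (x + 1) max_t ind
      else nextBigLoop arr ai maximum fuel (x + 1) max_t ind

def next_big_at (arr : List Int) (i : Int) : Int :=
  nextBigLoop arr (PySem.List.pyGetD arr i 0) (PySem.List.pyGetD arr (i - 1) 0) ((arr.length : Int) - i).toNat (i + 1) 0 (-1)

-- ===== PORT B =====
-- first pass: first x in range(i+1, n) with arr[x] >= threshold
def firstGE (arr : List Int) (threshold : Int) : List Int → Option Int
  | [] => none
  | x :: xs => if PySem.List.pyGetD arr x 0 ≥ threshold then some x else firstGE arr threshold xs

-- second pass: fold tracking (max_t, ind)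
def maxStep (arr : List Int) (ai : Int) (p : Int × Int) (x : Int) : Int × Int :=
  let ax := PySem.List.pyGetD arr x 0
  if ax > ai ∧ ax > p.1 then (ax, x) else p

def next_big_at_alt (arr : List Int) (i : Int) : Int :=
  let r := PySem.List.pyRange (i + 1) (arr.length : Int) 1
  match firstGE arr (PySem.List.pyGetD arr (i - 1) 0) r with
  | some x => x
  | none => (r.foldl (maxStep arr (PySem.List.pyGetD arr i 0)) (0, -1)).2

-- ===== PRECONDITION & SPEC =====
-- Pre_ is exactly the inputs on which Python A returns (elsewhere arr[i-1] or an arr[...] in the loop raises IndexError)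
def Pre_next_big_at (arr : List Int) (i : Int) : Prop :=
  arr ≠ [] ∧ 1 - (arr.length : Int) ≤ i ∧ i ≤ (arr.length : Int)
instance (arr : List Int) (i : Int) : Decidable (Pre_next_big_at arr i) := by unfold Pre_next_big_at; infer_instance
def pvWitness_next_big_at : List Int × Int := ([3, 1, 2, 5], 1)

def Spec_next_big_at (arr : List Int) (i : Int) (out : Int) : Prop := out = next_big_at_alt arr i
instance (arr : List Int) (i : Int) (out : Int) : Decidable (Spec_next_big_at arr i out) := by unfold Spec_next_big_at; infer_instance

-- ===== CLAIM (what is proved, stated in full; the proofs are below) =====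
def Claim_equal_next_big_at : Prop := ∀ (arr : List Int) (i : Int), Dom_next_big_at arr i → Pre_next_big_at arr i → Spec_next_big_at arr i (next_big_at arr i)

-- ===== LEMMAS AND PROOFS =====

-- A's loop from position x equals B's two passes over range(x, n), starting the fold at (max_t, ind).
theorem nextBigLoop_eq (arr : List Int) (ai maximum : Int) :
    ∀ (fuel : Nat) (x max_t ind : Int), ((arr.length : Int) - x).toNat ≤ fuel →
      nextBigLoop arr ai maximum fuel x max_t ind =
        (match firstGE arr maximum (PySem.List.pyRange x (arr.length : Int) 1) with
         | some y => y
         | none => ((PySem.List.pyRange x (arr.length : Int) 1).foldl (maxStep arr ai) (max_t, ind)).2) := by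
  intro fuel
  induction fuel with
  | zero =>
    intro x max_t ind hk
    have hx : (arr.length : Int) ≤ x := by omega
    rw [PySem.List.pyRange_one_eq_nil hx]
    simp [nextBigLoop, firstGE]
  | succ fuel ih =>
    intro x max_t ind hk
    by_cases hx : x > (arr.length : Int) - 1
    · rw [PySem.List.pyRange_one_eq_nil (by omega)]
      simp [nextBigLoop, firstGE, hx]
    · have hlt : x < (arr.length : Int) := by omega
      rw [PySem.List.pyRange_one_cons hlt]
      rw [nextBigLoop]
      simp only [hx, if_false]
      by_cases h1 : PySem.List.pyGetD arr x 0 ≥ maximum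
      · simp [firstGE, h1]
      · have hstep : maxStep arr ai (max_t, ind) x =
            (if PySem.List.pyGetD arr x 0 > ai ∧ PySem.List.pyGetD arr x 0 > max_t
             then (PySem.List.pyGetD arr x 0, x) else (max_t, ind)) := rfl
        simp only [firstGE, h1, if_false, List.foldl_cons, hstep]
        by_cases h2 : PySem.List.pyGetD arr x 0 > ai
        · by_cases h3 : PySem.List.pyGetD arr x 0 > max_t
          · simp only [h2, if_true, h3, and_self, if_true]
            exact ih (x + 1) _ _ (by omega)
          · simp only [h2, if_true, h3, if_false, and_false]
            exact ih (x + 1) _ _ (by omega)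
        · simp only [h2, if_false, false_and]
          exact ih (x + 1) _ _ (by omega)

-- ===== VERDICT (by name: the statement is the Claim_ definition above) =====
theorem next_big_at_spec : Claim_equal_next_big_at := by
  intro arr i _ _
  unfold Spec_next_big_at next_big_at next_big_at_alt
  exact nextBigLoop_eq arr (PySem.List.pyGetD arr i 0) (PySem.List.pyGetD arr (i - 1) 0)
    ((arr.length : Int) - i).toNat (i + 1) 0 (-1) (by omega)
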